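-- pv_equiv track=rewrite | github.com/Thuwapat/Real-Time-Dynamic-conifg-Rule-firewall-palo-alto | Get_traffic.py | analyze_unique_ips_per_second
-- ===== SOURCE A (Python) =====
-- from collections import defaultdict
--
-- def analyze_unique_ips_per_second(logs):
--     """
--     วิเคราะห์ Unique IP ใหม่ที่พบในแต่ละวินาทีจาก traffic logs
--     """
--     unique_ips = set()  # เก็บ IP ที่เคยพบแล้ว
--     new_unique_ips_per_sec = defaultdict(set)  # เก็บ IP ใหม่ที่ไม่เคยเห็นมาก่อน แยกตามเวลา
--
--     for log in logs:
--         timestamp = log.get('receive_time')  # ต้องตรวจสอบว่า 'receive_time' คือฟิลด์ที่ถูกต้อง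
--         src_ip = log.get('src')  # ดึงค่า IP ต้นทาง
--         if timestamp and src_ip:
--             timestamp_sec = timestamp.split('.')[0]  # ตัดให้เหลือระดับวินาที
--             if src_ip not in unique_ips:
--                 new_unique_ips_per_sec[timestamp_sec].add(src_ip)
--                 unique_ips.add(src_ip)
--
--     # แสดงผลลัพธ์
--     result = {time: len(ips) for time, ips in new_unique_ips_per_sec.items()}
--     return result
-- ===== SOURCE B (Python) =====
-- def analyze_unique_ips_per_second(logs):
--     # Scan BACKWARDS overwriting first[src] = (position, second): the last write wins,
--     # so each ip ends up with its earliest valid occurrence; then sort those records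
--     # by position to recover chronological order and tally the seconds.
--     first = {}
--     for pos in range(len(logs) - 1, -1, -1):
--         log = logs[pos]
--         timestamp = log.get('receive_time')
--         src_ip = log.get('src')
--         if timestamp and src_ip:
--             first[src_ip] = (pos, timestamp.split('.')[0])
--     result = {}
--     for entry in sorted(first.values(), key=lambda e: e[0]):
--         sec = entry[1]
--         result[sec] = result.get(sec, 0) + 1
--     return result
-- ===== Notes on version B (the rewrite author's own statement) =====
-- stated objective: alternative
-- what changed: B replaces A's forward scan with a seen-set and per-second sets by a backward scan that overwrites first[src]=(position, second) so the earliest valid occurrence per ip survives, then sorts those records by position and tallies seconds in chronological order.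
import Mathlib
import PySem

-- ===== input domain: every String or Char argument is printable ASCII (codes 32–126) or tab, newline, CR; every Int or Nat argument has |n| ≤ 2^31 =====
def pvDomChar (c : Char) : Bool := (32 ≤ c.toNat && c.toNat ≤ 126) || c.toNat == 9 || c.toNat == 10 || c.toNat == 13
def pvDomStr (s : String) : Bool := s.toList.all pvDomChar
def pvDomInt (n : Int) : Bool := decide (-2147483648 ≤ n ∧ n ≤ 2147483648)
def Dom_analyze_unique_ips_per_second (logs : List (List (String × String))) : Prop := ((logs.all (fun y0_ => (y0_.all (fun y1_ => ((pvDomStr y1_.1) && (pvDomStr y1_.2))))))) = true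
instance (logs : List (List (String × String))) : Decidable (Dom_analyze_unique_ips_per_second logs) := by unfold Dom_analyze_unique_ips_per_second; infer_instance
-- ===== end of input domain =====

-- B scans the logs BACKWARDS, overwriting first[src] = (position, second) so each ip
-- keeps its earliest valid occurrence, then sorts by position and tallies the seconds;
-- A scans forward with a seen-set and per-second sets. Proved to return A's exact dict.

-- shared field/second extraction (identical in both Pythons)
def pvTruthy : Option String → Bool
  | none => false
  | some s => s != ""

def pvSec (t : String) : String :=
  ((PySem.Str.split? t ".").getD []).headD ""   -- timestamp.split('.')[0]; sep ≠ "" so split? is some and nonempty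

-- ===== PORT A =====
def pvStepA (st : PySem.Set String × PySem.Dict String (PySem.Set String))
    (log : List (String × String)) :
    PySem.Set String × PySem.Dict String (PySem.Set String) :=
  let timestamp := (PySem.Dict.mk log).get? "receive_time"
  let src_ip := (PySem.Dict.mk log).get? "src"
  if pvTruthy timestamp && pvTruthy src_ip then
    let ip := src_ip.getD ""
    let sec := pvSec (timestamp.getD "")
    if PySem.Set.contains st.1 ip then st
    else (PySem.Set.add st.1 ip,
          st.2.modify sec PySem.Set.empty (fun s => PySem.Set.add s ip))
  else st

def analyze_unique_ips_per_second (logs : List (List (String × String))) : List (String × Int) :=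
  let st := logs.foldl pvStepA (PySem.Set.empty, PySem.Dict.empty)
  st.2.items.map (fun p => (p.1, PySem.Set.len p.2))

-- ===== PORT B =====
-- first[src_ip] = (pos, timestamp.split('.')[0]) inside the backwards position loop
def pvStepB (logs : List (List (String × String))) (fs : PySem.Dict String (Int × String))
    (pos : Int) : PySem.Dict String (Int × String) :=
  let log := PySem.List.pyGetD logs pos []
  let timestamp := (PySem.Dict.mk log).get? "receive_time"
  let src_ip := (PySem.Dict.mk log).get? "src"
  if pvTruthy timestamp && pvTruthy src_ip then
    fs.insert (src_ip.getD "") (pos, pvSec (timestamp.getD ""))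
  else fs

def analyze_unique_ips_per_second_alt (logs : List (List (String × String))) : List (String × Int) :=
  let first := (PySem.List.pyRange ((logs.length : Int) - 1) (-1) (-1)).foldl (pvStepB logs)
    PySem.Dict.empty
  let tally := (PySem.List.sorted first.values (fun e => e.1) false).foldl
    (fun r e => r.insert e.2 (r.getD e.2 0 + 1)) PySem.Dict.empty
  tally.items

-- ===== PRECONDITION & SPEC =====
def Spec_analyze_unique_ips_per_second (logs : List (List (String × String))) (out : List (String × Int)) : Prop := out = analyze_unique_ips_per_second_alt logs
instance (logs : List (List (String × String))) (out : List (String × Int)) : Decidable (Spec_analyze_unique_ips_per_second logs out) := by unfold Spec_analyze_unique_ips_per_second; infer_instance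

-- ===== CLAIM (what is proved, stated in full; the proofs are below) =====
def Claim_equal_analyze_unique_ips_per_second : Prop := ∀ (logs : List (List (String × String))), Dom_analyze_unique_ips_per_second logs → Spec_analyze_unique_ips_per_second logs (analyze_unique_ips_per_second logs)

-- ===== LEMMAS AND PROOFS =====

-- the stream of accepted (second, ip) events, given the set of already-seen ips
def pvEvents (seen : PySem.Set String) : List (List (String × String)) → List (String × String)
  | [] => []
  | log :: rest =>
    let timestamp := (PySem.Dict.mk log).get? "receive_time"
    let src_ip := (PySem.Dict.mk log).get? "src"
    if pvTruthy timestamp && pvTruthy src_ip && !(PySem.Set.contains seen (src_ip.getD "")) then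
      (pvSec (timestamp.getD ""), src_ip.getD "") ::
        pvEvents (PySem.Set.add seen (src_ip.getD "")) rest
    else pvEvents seen rest

-- the same stream carrying the absolute position of each event: (pos, sec, ip)
def pvEventsI (seen : PySem.Set String) (i : Int) :
    List (List (String × String)) → List (Int × String × String)
  | [] => []
  | log :: rest =>
    let timestamp := (PySem.Dict.mk log).get? "receive_time"
    let src_ip := (PySem.Dict.mk log).get? "src"
    if pvTruthy timestamp && pvTruthy src_ip && !(PySem.Set.contains seen (src_ip.getD "")) then
      (i, pvSec (timestamp.getD ""), src_ip.getD "") ::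
        pvEventsI (PySem.Set.add seen (src_ip.getD "")) (i + 1) rest
    else pvEventsI seen (i + 1) rest

-- the first-seen value of an ip: position and second of its first valid occurrence
def pvFirst? (i : Int) : List (List (String × String)) → String → Option (Int × String)
  | [], _ => none
  | log :: rest, ip =>
    let timestamp := (PySem.Dict.mk log).get? "receive_time"
    let src_ip := (PySem.Dict.mk log).get? "src"
    if pvTruthy timestamp && pvTruthy src_ip && src_ip.getD "" == ip then
      some (i, pvSec (timestamp.getD ""))
    else pvFirst? (i + 1) rest ip

-- structural form of B's backwards fold
def pvFirstDict (i : Int) : List (List (String × String)) → PySem.Dict String (Int × String)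
  | [] => PySem.Dict.empty
  | log :: rest =>
    let F := pvFirstDict (i + 1) rest
    let timestamp := (PySem.Dict.mk log).get? "receive_time"
    let src_ip := (PySem.Dict.mk log).get? "src"
    if pvTruthy timestamp && pvTruthy src_ip then
      F.insert (src_ip.getD "") (i, pvSec (timestamp.getD ""))
    else F

def pvGStep (D : PySem.Dict String (PySem.Set String)) (p : String × String) :
    PySem.Dict String (PySem.Set String) :=
  D.modify p.1 PySem.Set.empty (fun s => PySem.Set.add s p.2)

-- A's fold factors through the event stream
theorem pvFoldA (logs : List (List (String × String))) :
    ∀ (U : PySem.Set String) (D : PySem.Dict String (PySem.Set String)),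
      logs.foldl pvStepA (U, D)
        = (PySem.Set.update U ((pvEvents U logs).map Prod.snd),
           (pvEvents U logs).foldl pvGStep D) := by
  induction logs with
  | nil => intro U D; simp [pvEvents, PySem.Set.update]
  | cons log rest ih =>
    intro U D
    simp only [List.foldl_cons, pvEvents, pvStepA]
    by_cases hT : pvTruthy ((PySem.Dict.mk log).get? "receive_time") = true <;>
      by_cases hS : pvTruthy ((PySem.Dict.mk log).get? "src") = true <;>
      by_cases hU : (((PySem.Dict.mk log).get? "src").getD "") ∈ U <;>
      simp [hT, hS, hU, ih, PySem.Set.update_cons, pvGStep]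

-- events' ips are fresh w.r.t. seen and pairwise distinct
theorem pvEventsSnd (logs : List (List (String × String))) :
    ∀ (seen : PySem.Set String),
      (∀ ip ∈ (pvEvents seen logs).map Prod.snd, ip ∉ seen)
        ∧ ((pvEvents seen logs).map Prod.snd).Nodup := by
  induction logs with
  | nil => intro seen; simp [pvEvents]
  | cons log rest ih =>
    intro seen
    simp only [pvEvents]
    by_cases hc : (pvTruthy ((PySem.Dict.mk log).get? "receive_time")
        && pvTruthy ((PySem.Dict.mk log).get? "src")
        && !(PySem.Set.contains seen (((PySem.Dict.mk log).get? "src").getD ""))) = true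
    · rw [if_pos hc]
      have hM : (((PySem.Dict.mk log).get? "src").getD "") ∉ seen := by
        simp only [Bool.and_eq_true, Bool.not_eq_true'] at hc
        have h2 := hc.2
        simp at h2
        exact h2
      simp only [List.map_cons, List.nodup_cons]
      obtain ⟨hfresh, hnd⟩ := ih (PySem.Set.add seen (((PySem.Dict.mk log).get? "src").getD ""))
      refine ⟨?_, ?_, hnd⟩
      · intro x hx
        rcases List.mem_cons.mp hx with rfl | hx'
        · exact hM
        · intro hs
          exact hfresh x hx' ((PySem.Set.mem_add _ _ _).mpr (Or.inl hs))
      · intro hmem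
        exact hfresh _ hmem ((PySem.Set.mem_add _ _ _).mpr (Or.inr rfl))
    · rw [if_neg hc]
      exact ih seen

-- counting the grouped sets: length of each per-second set = count of that second
theorem pvGroupLen (E : List (String × String)) :
    ∀ (D : PySem.Dict String (PySem.Set String)),
      (E.map Prod.snd).Nodup →
      (∀ p ∈ E, ∀ sec, p.2 ∉ D.getD sec PySem.Set.empty) →
      ∀ sec, PySem.Set.len ((E.foldl pvGStep D).getD sec PySem.Set.empty)
        = PySem.Set.len (D.getD sec PySem.Set.empty) + ((E.map Prod.fst).count sec : Int) := by
  induction E with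
  | nil => intro D _ _ sec; simp
  | cons e E ih =>
    intro D hnd hfresh sec
    simp only [List.map_cons, List.nodup_cons] at hnd
    have he2 : e.2 ∉ D.getD e.1 PySem.Set.empty := hfresh e (by simp) e.1
    have hstep : ∀ s, (pvGStep D e).getD s PySem.Set.empty
        = if s = e.1 then PySem.Set.add (D.getD e.1 PySem.Set.empty) e.2
          else D.getD s PySem.Set.empty := by
      intro s; exact PySem.Dict.getD_modify D e.1 s PySem.Set.empty _
    have hfresh' : ∀ p ∈ E, ∀ s, p.2 ∉ (pvGStep D e).getD s PySem.Set.empty := by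
      intro p hp s
      rw [hstep]
      split_ifs with hs
      · rw [PySem.Set.mem_add]
        rintro (hin | heq)
        · exact hfresh p (by simp [hp]) e.1 hin
        · exact hnd.1 (heq ▸ List.mem_map_of_mem hp)
      · exact hfresh p (by simp [hp]) s
    rw [List.foldl_cons, ih (pvGStep D e) hnd.2 hfresh' sec, hstep sec]
    by_cases hs : sec = e.1
    · subst hs
      rw [PySem.Set.add_of_not_mem he2]
      simp [PySem.Set.len]
      ring
    · simp [hs, Ne.symm hs]

-- A's grouped items are Counter of the event seconds
theorem pvMain (E : List (String × String)) (hnd : (E.map Prod.snd).Nodup) :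
    (E.foldl pvGStep (PySem.Dict.empty : PySem.Dict String (PySem.Set String))).items.map
        (fun p => (p.1, PySem.Set.len p.2))
      = (PySem.Dict.counter (E.map Prod.fst)).items := by
  rw [PySem.Dict.items_counter]
  have hkeys : (E.foldl pvGStep (PySem.Dict.empty : PySem.Dict String (PySem.Set String))).keys
      = PySem.Set.ofList (E.map Prod.fst) := by
    have := PySem.Dict.keys_foldl_modify_key E Prod.fst PySem.Set.empty
        (fun _ p => fun s => PySem.Set.add s p.2) PySem.Dict.empty
    simpa [pvGStep, PySem.Dict.keys_empty, PySem.Set.update_nil_left] using this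
  have hnodup : (E.foldl pvGStep (PySem.Dict.empty : PySem.Dict String (PySem.Set String))).keys.Nodup := by
    have := PySem.Dict.nodup_keys_foldl_modify_key E Prod.fst PySem.Set.empty
        (fun _ p => fun s => PySem.Set.add s p.2) PySem.Dict.empty (by simp)
    simpa [pvGStep] using this
  rw [PySem.Dict.items_eq_map_keys _ hnodup PySem.Set.empty, hkeys, List.map_map]
  apply List.map_congr_left
  intro k _
  simp only [Function.comp]
  rw [pvGroupLen E PySem.Dict.empty hnd (by intro p _ s; simp) k]
  simp [PySem.Set.len]

-- the indexed stream projects to the plain one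
theorem pvEventsI_proj (logs : List (List (String × String))) :
    ∀ (seen : PySem.Set String) (i : Int),
      (pvEventsI seen i logs).map (fun e => (e.2.1, e.2.2)) = pvEvents seen logs := by
  induction logs with
  | nil => intro seen i; simp [pvEventsI, pvEvents]
  | cons log rest ih =>
    intro seen i
    simp only [pvEventsI, pvEvents]
    split_ifs with hc
    · simp [ih]
    · exact ih seen (i + 1)

-- every position in the indexed stream is ≥ the starting position
theorem pvEventsI_fst_ge (logs : List (List (String × String))) :
    ∀ (seen : PySem.Set String) (i : Int), ∀ e ∈ pvEventsI seen i logs, i ≤ e.1 := by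
  induction logs with
  | nil => intro seen i e he; simp [pvEventsI] at he
  | cons log rest ih =>
    intro seen i e he
    simp only [pvEventsI] at he
    split_ifs at he with hc
    · rcases List.mem_cons.mp he with rfl | he'
      · exact le_refl _
      · have := ih _ (i + 1) e he'; omega
    · have := ih seen (i + 1) e he; omega

-- positions are strictly increasing along the indexed stream
theorem pvEventsI_pairwise (logs : List (List (String × String))) :
    ∀ (seen : PySem.Set String) (i : Int),
      (pvEventsI seen i logs).Pairwise (fun a b => a.1 < b.1) := by
  induction logs with
  | nil => intro seen i; simp [pvEventsI]
  | cons log rest ih =>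
    intro seen i
    simp only [pvEventsI]
    split_ifs with hc
    · refine List.Pairwise.cons ?_ (ih _ (i + 1))
      intro e he
      have := pvEventsI_fst_ge rest _ (i + 1) e he
      simp only
      omega
    · exact ih seen (i + 1)

-- membership in the indexed stream = first-valid-occurrence record, ip unseen
theorem pvEventsI_mem (logs : List (List (String × String))) :
    ∀ (seen : PySem.Set String) (i : Int) (pos : Int) (sec ip : String),
      (pos, sec, ip) ∈ pvEventsI seen i logs
        ↔ (ip ∉ seen ∧ pvFirst? i logs ip = some (pos, sec)) := by
  induction logs with
  | nil => intro seen i pos sec ip; simp [pvEventsI, pvFirst?]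
  | cons log rest ih =>
    intro seen i pos sec ip
    simp only [pvEventsI, pvFirst?]
    by_cases hT : pvTruthy ((PySem.Dict.mk log).get? "receive_time") = true
    · by_cases hS : pvTruthy ((PySem.Dict.mk log).get? "src") = true
      · by_cases hE : (((PySem.Dict.mk log).get? "src").getD "") = ip
        · subst hE
          by_cases hU : (((PySem.Dict.mk log).get? "src").getD "") ∈ seen
          · -- ip already seen: stream skips; first? would report here, both sides false
            have hct : List.contains seen (((PySem.Dict.mk log).get? "src").getD "") = true :=
              List.contains_iff_mem.mpr hU
            simp only [hT, hS, PySem.Set.contains, hct, Bool.not_true, Bool.and_false,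
              if_neg (by simp : ¬ (false = true)), Bool.and_true, beq_self_eq_true, if_true]
            rw [ih seen (i + 1)]
            simp [hU]
          · have hcf : List.contains seen (((PySem.Dict.mk log).get? "src").getD "") = false :=
              Bool.eq_false_iff.mpr (fun h => hU (List.contains_iff_mem.mp h))
            simp only [hT, hS, PySem.Set.contains, hcf, Bool.not_false, Bool.and_true,
              beq_self_eq_true, List.mem_cons, if_true]
            rw [ih _ (i + 1)]
            constructor
            · rintro (h | ⟨hns, _⟩)
              · refine ⟨hU, ?_⟩
                injection h with h1 h2
                injection h2 with h2 _
                rw [h1, h2]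
              · exfalso
                exact hns ((PySem.Set.mem_add _ _ _).mpr (Or.inr rfl))
            · rintro ⟨_, hsome⟩
              left
              injection hsome with h
              have h1 : i = pos := congrArg Prod.fst h
              have h2 : pvSec (((PySem.Dict.mk log).get? "receive_time").getD "") = sec :=
                congrArg Prod.snd h
              rw [← h1, ← h2]
        · -- a different ip than this log's src
          have hBeq : ((((PySem.Dict.mk log).get? "src").getD "") == ip) = false := by
            simp [hE]
          by_cases hU : (((PySem.Dict.mk log).get? "src").getD "") ∈ seen
          · have hct : List.contains seen (((PySem.Dict.mk log).get? "src").getD "") = true :=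
              List.contains_iff_mem.mpr hU
            simp only [hT, hS, PySem.Set.contains, hct, Bool.not_true, Bool.and_false,
              if_neg (by simp : ¬ (false = true)), hBeq]
            exact ih seen (i + 1) pos sec ip
          · have hcf : List.contains seen (((PySem.Dict.mk log).get? "src").getD "") = false :=
              Bool.eq_false_iff.mpr (fun h => hU (List.contains_iff_mem.mp h))
            simp only [hT, hS, PySem.Set.contains, hcf, Bool.not_false, Bool.and_true,
              if_true, hBeq, List.mem_cons]
            rw [ih _ (i + 1)]
            constructor
            · rintro (h | ⟨hns, hf⟩)
              · exfalso; injection h with _ h2; injection h2 with _ h3; exact hE h3.symm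
              · exact ⟨fun hm => hns ((PySem.Set.mem_add _ _ _).mpr (Or.inl hm)), hf⟩
            · rintro ⟨hns, hf⟩
              right
              refine ⟨?_, hf⟩
              intro hm
              rcases (PySem.Set.mem_add _ _ _).mp hm with hm' | rfl
              · exact hns hm'
              · exact hE rfl
      · simp only [hS, Bool.and_false]
        exact ih seen (i + 1) pos sec ip
    · simp only [hT, Bool.false_and, if_neg (by simp : ¬ (false = true))]
      exact ih seen (i + 1) pos sec ip

-- pvFirstDict's lookups are pvFirst?
theorem pvFirstDict_get? (logs : List (List (String × String))) :
    ∀ (i : Int) (ip : String), (pvFirstDict i logs).get? ip = pvFirst? i logs ip := by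
  induction logs with
  | nil => intro i ip; simp [pvFirstDict, pvFirst?, PySem.Dict.get?_empty]
  | cons log rest ih =>
    intro i ip
    simp only [pvFirstDict, pvFirst?]
    by_cases hc : (pvTruthy ((PySem.Dict.mk log).get? "receive_time")
        && pvTruthy ((PySem.Dict.mk log).get? "src")) = true
    · rw [if_pos hc]
      by_cases hE : (((PySem.Dict.mk log).get? "src").getD "") = ip
      · subst hE
        rw [PySem.Dict.get?_insert_self]
        simp [hc]
      · rw [PySem.Dict.get?_insert_of_ne _ _ (fun h => hE h.symm)]
        have hBeq : ((((PySem.Dict.mk log).get? "src").getD "") == ip) = false := by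
          simp [hE]
        simp only [hc, hBeq, Bool.and_false]
        exact ih (i + 1) ip
    · rw [if_neg hc]
      simp only [Bool.and_eq_true] at hc
      by_cases hT : pvTruthy ((PySem.Dict.mk log).get? "receive_time") = true <;>
        by_cases hS : pvTruthy ((PySem.Dict.mk log).get? "src") = true <;>
        simp [hT, hS, ih (i + 1) ip] at hc ⊢

theorem pvFirstDict_nodup (logs : List (List (String × String))) :
    ∀ (i : Int), (pvFirstDict i logs).keys.Nodup := by
  induction logs with
  | nil => intro i; simp [pvFirstDict]
  | cons log rest ih =>
    intro i
    simp only [pvFirstDict]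
    split_ifs with hc
    · exact PySem.Dict.nodup_keys_insert _ _ _ (ih (i + 1))
    · exact ih (i + 1)

-- B's backwards position fold IS pvFirstDict on the dropped suffix
theorem pvFoldB_drop (logs : List (List (String × String))) :
    ∀ (rest : List (List (String × String))) (a : Nat), logs.drop a = rest →
      (PySem.List.pyRange (a : Int) (logs.length : Int) 1).foldr
          (fun pos F => pvStepB logs F pos) PySem.Dict.empty
        = pvFirstDict (a : Int) rest := by
  intro rest
  induction rest with
  | nil =>
    intro a ha
    have hlen : logs.length ≤ a := List.drop_eq_nil_iff.mp ha
    rw [PySem.List.pyRange_one_eq_nil (by exact_mod_cast hlen)]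
    simp [pvFirstDict]
  | cons log rest ih =>
    intro a ha
    have hlt : a < logs.length := by
      by_contra h
      rw [List.drop_eq_nil_iff.mpr (by omega)] at ha
      exact List.cons_ne_nil _ _ ha.symm
    have hget : logs[a]? = some log := by
      rw [← List.head?_drop, ha]; rfl
    rw [PySem.List.pyRange_one_cons (by exact_mod_cast hlt), List.foldr_cons]
    have hdrop : logs.drop (a + 1) = rest := by
      have h1 : List.drop 1 (List.drop a logs) = rest := by rw [ha]; rfl
      rw [List.drop_drop] at h1
      exact h1
    have hcast : ((a : Int) + 1) = ((a + 1 : Nat) : Int) := by push_cast; ring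
    rw [hcast, ih (a + 1) hdrop]
    simp only [pvStepB, pvFirstDict]
    have hgetD : PySem.List.pyGetD logs ((a : Nat) : Int) [] = log := by
      rw [PySem.List.pyGetD_natCast]
      simp [List.getD, hget]
    rw [hgetD, ← hcast]

-- B's whole backwards range fold is pvFirstDict over the full list
theorem pvFoldB_eq (logs : List (List (String × String))) :
    (PySem.List.pyRange ((logs.length : Int) - 1) (-1) (-1)).foldl (pvStepB logs)
        PySem.Dict.empty
      = pvFirstDict 0 logs := by
  have hrange : PySem.List.pyRange ((logs.length : Int) - 1) (-1) (-1)
      = (PySem.List.pyRange 0 (logs.length : Int) 1).reverse := by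
    have := PySem.List.pyRange_neg_one_eq_reverse ((logs.length : Int) - 1) (-1)
    simpa using this
  rw [hrange, List.foldl_reverse]
  have := pvFoldB_drop logs logs 0 (by simp)
  simpa using this

-- sorting B's first-seen values by position yields the indexed event stream's values
theorem pvSortedValues (logs : List (List (String × String))) :
    PySem.List.sorted (pvFirstDict 0 logs).values (fun e => e.1) false
      = (pvEventsI PySem.Set.empty 0 logs).map (fun e => (e.1, e.2.1)) := by
  set E := pvEventsI PySem.Set.empty 0 logs with hE
  set F := pvFirstDict 0 logs with hF
  have hnodupK : F.keys.Nodup := pvFirstDict_nodup logs 0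
  have hndips : (E.map (fun e => e.2.2)).Nodup := by
    have h1 : E.map (fun e => e.2.2) = (pvEvents PySem.Set.empty logs).map Prod.snd := by
      rw [hE, ← pvEventsI_proj logs PySem.Set.empty 0, List.map_map]
      rfl
    rw [h1]
    exact (pvEventsSnd logs PySem.Set.empty).2
  -- key membership ↔ event ip
  have hmemIff : ∀ ip, ip ∈ F.keys ↔ ip ∈ E.map (fun e => e.2.2) := by
    intro ip
    constructor
    · intro hk
      have hsome : F.get? ip ≠ none := fun h =>
        ((PySem.Dict.get?_eq_none_iff_not_mem_keys F ip).mp h) hk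
      rw [hF, pvFirstDict_get?] at hsome
      rcases Option.ne_none_iff_exists'.mp hsome with ⟨⟨pos, sec⟩, hps⟩
      have : (pos, sec, ip) ∈ E := by
        rw [hE, pvEventsI_mem]
        exact ⟨by simp [PySem.Set.empty], hps⟩
      exact List.mem_map.mpr ⟨(pos, sec, ip), this, rfl⟩
    · intro hm
      rcases List.mem_map.mp hm with ⟨e, heE, hip⟩
      have := (pvEventsI_mem logs PySem.Set.empty 0 e.1 e.2.1 e.2.2).mp (by
        rw [← hE]; simpa using heE)
      have hsome : F.get? e.2.2 = some (e.1, e.2.1) := by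
        rw [hF, pvFirstDict_get?]; exact this.2
      rw [← hip]
      rw [← PySem.Dict.contains_iff_mem_keys]
      rw [PySem.Dict.contains_eq_isSome_get?, hsome]
      rfl
  have hperm : F.keys.Perm (E.map (fun e => e.2.2)) :=
    (List.perm_ext_iff_of_nodup hnodupK hndips).mpr hmemIff
  -- values of F over those keys
  have hvals : F.values = F.keys.map (fun k => F.getD k (0, "")) :=
    PySem.Dict.values_eq_map_keys F hnodupK (0, "")
  have hgetE : ∀ e ∈ E, F.getD e.2.2 (0, "") = (e.1, e.2.1) := by
    intro e heE
    have := (pvEventsI_mem logs PySem.Set.empty 0 e.1 e.2.1 e.2.2).mp (by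
      rw [← hE]; simpa using heE)
    have hsome : F.get? e.2.2 = some (e.1, e.2.1) := by
      rw [hF, pvFirstDict_get?]; exact this.2
    exact PySem.Dict.getD_of_get?_eq_some F (0, "") hsome
  have hmapped : (E.map (fun e => e.2.2)).map (fun k => F.getD k (0, ""))
      = E.map (fun e => (e.1, e.2.1)) := by
    rw [List.map_map]
    exact List.map_congr_left (fun e he => hgetE e he)
  have hpermV : (E.map (fun e => (e.1, e.2.1))).Perm F.values := by
    rw [hvals, ← hmapped]
    exact (hperm.map _).symm
  have hpw : (E.map (fun e => (e.1, e.2.1))).Pairwise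
      (fun a b => (fun e : Int × String => e.1) a < (fun e : Int × String => e.1) b) := by
    have := pvEventsI_pairwise logs PySem.Set.empty 0
    rw [← hE] at this
    exact List.Pairwise.map _ (fun a b h => h) this
  exact PySem.List.sorted_eq_of_perm_of_pairwise_lt _ _ _ hpermV hpw

-- ===== VERDICT (by name: the statement is the Claim_ definition above) =====
theorem analyze_unique_ips_per_second_spec : Claim_equal_analyze_unique_ips_per_second := by
  intro logs _
  show analyze_unique_ips_per_second logs = analyze_unique_ips_per_second_alt logs
  unfold analyze_unique_ips_per_second analyze_unique_ips_per_second_alt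
  rw [pvFoldA, pvFoldB_eq]
  show List.map (fun p => (p.1, PySem.Set.len p.2))
      (List.foldl pvGStep PySem.Dict.empty (pvEvents PySem.Set.empty logs)).items
    = (List.foldl (fun r (e : Int × String) => r.insert e.2 (r.getD e.2 0 + 1))
        PySem.Dict.empty
        (PySem.List.sorted (pvFirstDict 0 logs).values (fun e => e.1))).items
  rw [pvSortedValues]
  set E := pvEventsI PySem.Set.empty 0 logs with hE
  have hnd : ((pvEvents PySem.Set.empty logs).map Prod.snd).Nodup :=
    (pvEventsSnd logs PySem.Set.empty).2
  rw [pvMain (pvEvents PySem.Set.empty logs) hnd]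
  -- the tally fold over the sorted records is Counter of the event seconds
  have htally : (E.map (fun e => (e.1, e.2.1))).foldl
        (fun r (e : Int × String) => r.insert e.2 (r.getD e.2 0 + 1)) PySem.Dict.empty
      = PySem.Dict.counter ((pvEvents PySem.Set.empty logs).map Prod.fst) := by
    have hsecs : (E.map (fun e => (e.1, e.2.1))).map (fun e : Int × String => e.2)
        = (pvEvents PySem.Set.empty logs).map Prod.fst := by
      rw [List.map_map, hE, ← pvEventsI_proj logs PySem.Set.empty 0, List.map_map]
      rfl
    rw [← PySem.Dict.foldl_insert_getD_add_one_eq_counter, ← hsecs]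
    simp only [List.foldl_map]
  rw [htally]
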